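-- pv_equiv track=rewrite | github.com/MaromSv/Virtual-Trainer | Webserver/app.py | days_available_to_bool
-- ===== SOURCE A (Python) =====
-- def days_available_to_bool(days_available):
--     days_available = days_available.split(",")
--     days_available_bool = [False,False,False,False,False,False,False]
--     for i in days_available:
--         if i == "Monday":
--             days_available_bool[0] = True
--         elif i == "Tuesday":
--             days_available_bool[1] = True
--         elif i == "Wednesday":
--             days_available_bool[2] = True
--         elif i == "Thursday":
--             days_available_bool[3] = True
--         elif i == "Friday":
--             days_available_bool[4] = True
--         elif i == "Saturday":
--             days_available_bool[5] = True
--         elif i == "Sunday":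
--             days_available_bool[6] = True
--     return days_available_bool
-- ===== SOURCE B (Python) =====
-- WEEKDAYS = ["Monday", "Tuesday", "Wednesday", "Thursday", "Friday", "Saturday", "Sunday"]
--
-- def days_available_to_bool(days_available):
--     chosen = set(days_available.split(","))
--     return [day in chosen for day in WEEKDAYS]
-- ===== Notes on version B (the rewrite author's own statement) =====
-- stated objective: idiomatic
-- what changed: Instead of looping over the input tokens and imperatively setting positions of a 7-slot boolean list, B builds a set of the tokens once and produces the result as a comprehension over the fixed ordered weekday list, testing membership per output position.
import Mathlib
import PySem

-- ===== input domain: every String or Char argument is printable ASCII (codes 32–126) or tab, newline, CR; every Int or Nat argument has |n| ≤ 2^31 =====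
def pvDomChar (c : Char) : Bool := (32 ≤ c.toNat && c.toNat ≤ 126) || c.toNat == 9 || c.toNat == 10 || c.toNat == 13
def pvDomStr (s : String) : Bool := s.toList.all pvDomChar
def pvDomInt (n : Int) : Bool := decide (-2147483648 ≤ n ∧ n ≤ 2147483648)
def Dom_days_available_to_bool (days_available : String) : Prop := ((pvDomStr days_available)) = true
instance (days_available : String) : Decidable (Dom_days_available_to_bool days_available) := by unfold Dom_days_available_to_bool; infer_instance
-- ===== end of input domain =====

-- B replaces A's imperative token loop (setting slots of a 7-element list) by a set of tokens
-- and a membership test per weekday position; idiomatic, same cost.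

-- ===== PORT A =====
-- the body of A's for-loop: set the matching slot of the accumulator
def pvStep (acc : List Bool) (i : String) : List Bool :=
  if i = "Monday" then acc.set 0 true
  else if i = "Tuesday" then acc.set 1 true
  else if i = "Wednesday" then acc.set 2 true
  else if i = "Thursday" then acc.set 3 true
  else if i = "Friday" then acc.set 4 true
  else if i = "Saturday" then acc.set 5 true
  else if i = "Sunday" then acc.set 6 true
  else acc

def days_available_to_bool (days_available : String) : List Bool :=
  ((PySem.Str.split? days_available ",").getD []).foldl pvStep
    [false, false, false, false, false, false, false]

-- ===== PORT B =====
def pvWEEKDAYS : List String :=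
  ["Monday", "Tuesday", "Wednesday", "Thursday", "Friday", "Saturday", "Sunday"]

def days_available_to_bool_alt (days_available : String) : List Bool :=
  let chosen := PySem.Set.ofList ((PySem.Str.split? days_available ",").getD [])
  pvWEEKDAYS.map (fun day => PySem.Set.contains chosen day)

-- ===== PRECONDITION & SPEC =====
def Spec_days_available_to_bool (days_available : String) (out : List Bool) : Prop := out = days_available_to_bool_alt days_available
instance (days_available : String) (out : List Bool) : Decidable (Spec_days_available_to_bool days_available out) := by unfold Spec_days_available_to_bool; infer_instance

-- ===== CLAIM (what is proved, stated in full; the proofs are below) =====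
def Claim_equal_days_available_to_bool : Prop := ∀ (days_available : String), Dom_days_available_to_bool days_available → Spec_days_available_to_bool days_available (days_available_to_bool days_available)

-- ===== LEMMAS AND PROOFS =====

-- A's fold over the tokens, started from any 7-slot state, yields each slot OR-ed with
-- whether the corresponding weekday occurs among the tokens.
theorem pv_fold_step (l : List String) (b0 b1 b2 b3 b4 b5 b6 : Bool) :
    l.foldl pvStep [b0, b1, b2, b3, b4, b5, b6] =
      [b0 || l.contains "Monday", b1 || l.contains "Tuesday", b2 || l.contains "Wednesday",
       b3 || l.contains "Thursday", b4 || l.contains "Friday", b5 || l.contains "Saturday",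
       b6 || l.contains "Sunday"] := by
  induction l generalizing b0 b1 b2 b3 b4 b5 b6 with
  | nil => simp
  | cons i t ih =>
    simp only [List.foldl_cons, pvStep]
    split_ifs with h1 h2 h3 h4 h5 h6 h7
    · subst h1
      simp only [List.set]
      rw [ih]
      simp
    · subst h2
      simp only [List.set]
      rw [ih]
      simp
    · subst h3
      simp only [List.set]
      rw [ih]
      simp
    · subst h4
      simp only [List.set]
      rw [ih]
      simp
    · subst h5
      simp only [List.set]
      rw [ih]
      simp
    · subst h6
      simp only [List.set]
      rw [ih]
      simp
    · subst h7
      simp only [List.set]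
      rw [ih]
      simp
    · rw [ih]
      simp [Ne.symm h1, Ne.symm h2, Ne.symm h3, Ne.symm h4, Ne.symm h5, Ne.symm h6, Ne.symm h7]

theorem pv_contains_ofList (l : List String) (d : String) :
    PySem.Set.contains (PySem.Set.ofList l) d = l.contains d := by
  simp [PySem.Set.contains]

theorem days_available_to_bool_spec : Claim_equal_days_available_to_bool := by
  intro s _
  unfold Spec_days_available_to_bool days_available_to_bool days_available_to_bool_alt pvWEEKDAYS
  simp only [List.map, pv_contains_ofList, pv_fold_step, Bool.false_or]
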